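-- pv_equiv track=rewrite | github.com/LucasLiuXinqi/DataStructures | Lecture 3/Assignemnt Solution/problem_4 - Copy (6).py | stone_counter
-- ===== SOURCE A (Python) =====
-- def stone_counter(N, M, c, res, total):
--     if c > M:
--         if N == 0:
--             total.append(tuple(res))
--     elif c % 2 == 0:
--         temp = res[:]
--         res.append(1)
--         temp.append(3)
--         stone_counter(N - 1, M, c + 1, res, total)
--         stone_counter(N - 3, M, c + 1, temp, total)
--     else:
--         temp = res[:]
--         temp1 = res[:]
--         res.append(1)
--         temp.append(2)
--         temp1.append(3)
--         stone_counter(N - 1, M, c + 1, res, total)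
--         stone_counter(N - 2, M, c + 1, temp, total)
--         stone_counter(N - 3, M, c + 1, temp1, total)
--     return total
-- ===== SOURCE B (Python) =====
-- def stone_counter(N, M, c, res, total):
--     # Iterative breadth-first expansion instead of A's DFS recursion.
--     # Note: equivalence is about the return value only; A mutates res and total
--     # in place, B does not.
--     states = [(N, list(res))]
--     for i in range(c, M + 1):
--         allowed = (1, 3) if i % 2 == 0 else (1, 2, 3)
--         states = [(n - v, pre + [v]) for (n, pre) in states for v in allowed]
--     out = list(total)
--     for n, seq in states:
--         if n == 0:
--             out.append(tuple(seq))
--     return out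
-- ===== Notes on version B (the rewrite author's own statement) =====
-- stated objective: alternative
-- what changed: A's depth-first recursion (which also mutates res and total in place) is replaced by an iterative breadth-first product: a worklist of (remaining-sum, sequence) states is expanded position by position over range(c, M+1), then the states with remaining sum 0 are appended to a copy of total; equivalence is about the return value only.
import Mathlib
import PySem

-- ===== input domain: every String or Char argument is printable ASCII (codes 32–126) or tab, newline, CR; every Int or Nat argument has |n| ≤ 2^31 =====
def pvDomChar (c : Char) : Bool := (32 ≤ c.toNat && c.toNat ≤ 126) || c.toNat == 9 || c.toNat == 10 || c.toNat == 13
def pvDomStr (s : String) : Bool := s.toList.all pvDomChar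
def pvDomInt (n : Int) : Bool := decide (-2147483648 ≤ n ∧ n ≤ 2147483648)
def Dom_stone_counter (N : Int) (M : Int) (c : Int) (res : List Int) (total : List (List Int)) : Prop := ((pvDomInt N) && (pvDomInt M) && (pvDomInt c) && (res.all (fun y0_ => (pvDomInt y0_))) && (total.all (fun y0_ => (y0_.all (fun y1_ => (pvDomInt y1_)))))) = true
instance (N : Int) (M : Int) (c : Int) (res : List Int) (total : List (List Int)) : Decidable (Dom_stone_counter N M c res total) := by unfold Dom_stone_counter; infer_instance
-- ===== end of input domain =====

-- B replaces A's DFS recursion by an iterative breadth-first state expansion (alternative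
-- decomposition, same cost); equivalence is about the RETURN value only — A mutates res and
-- total in place, B does not.

-- ===== PORT A =====
def stone_counter (N : Int) (M : Int) (c : Int) (res : List Int) (total : List (List Int)) : List (List Int) :=
  if c > M then
    if N = 0 then total ++ [res] else total
  else if PySem.Int.mod c 2 = 0 then
    stone_counter (N - 3) M (c + 1) (res ++ [3])
      (stone_counter (N - 1) M (c + 1) (res ++ [1]) total)
  else
    stone_counter (N - 3) M (c + 1) (res ++ [3])
      (stone_counter (N - 2) M (c + 1) (res ++ [2])
        (stone_counter (N - 1) M (c + 1) (res ++ [1]) total))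
termination_by (M + 1 - c).toNat
decreasing_by all_goals (simp [PySem.Int.mod] at *; omega)

-- ===== PORT B =====
def stone_counter_alt (N : Int) (M : Int) (c : Int) (res : List Int) (total : List (List Int)) : List (List Int) :=
  let states := (PySem.List.pyRange c (M + 1) 1).foldl
    (fun S i =>
      let allowed := if PySem.Int.mod i 2 = 0 then [(1 : Int), 3] else [1, 2, 3]
      S.flatMap (fun s => allowed.map (fun v => (s.1 - v, s.2 ++ [v]))))
    [(N, res)]
  states.foldl (fun t s => if s.1 = 0 then t ++ [s.2] else t) total

-- ===== PRECONDITION & SPEC =====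
-- Pre_ excludes only inputs whose recursion depth M - c + 2 approaches the interpreter's
-- recursion limit: there Python A raises RecursionError (on its first all-ones descent)
-- and never returns a value; everywhere else A returns normally (possibly very slowly).
def Pre_stone_counter (N : Int) (M : Int) (c : Int) (res : List Int) (total : List (List Int)) : Prop := M - c < 9000
instance (N : Int) (M : Int) (c : Int) (res : List Int) (total : List (List Int)) : Decidable (Pre_stone_counter N M c res total) := by unfold Pre_stone_counter; infer_instance
def pvWitness_stone_counter : Int × Int × Int × List Int × List (List Int) := (4, 2, 0, [], [])
def Spec_stone_counter (N : Int) (M : Int) (c : Int) (res : List Int) (total : List (List Int)) (out : List (List Int)) : Prop := out = stone_counter_alt N M c res total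
instance (N : Int) (M : Int) (c : Int) (res : List Int) (total : List (List Int)) (out : List (List Int)) : Decidable (Spec_stone_counter N M c res total out) := by unfold Spec_stone_counter; infer_instance

-- ===== CLAIM (what is proved, stated in full; the proofs are below) =====
def Claim_equal_stone_counter : Prop := ∀ (N : Int) (M : Int) (c : Int) (res : List Int) (total : List (List Int)), Dom_stone_counter N M c res total → Pre_stone_counter N M c res total → Spec_stone_counter N M c res total (stone_counter N M c res total)

-- ===== LEMMAS AND PROOFS =====

-- the common mathematical value: all completions of length n starting at position c
def pvBuild : Nat → Int → Int → List Int → List (List Int)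
  | 0, _, N, res => if N = 0 then [res] else []
  | n + 1, c, N, res =>
    (if PySem.Int.mod c 2 = 0 then [(1 : Int), 3] else [1, 2, 3]).flatMap
      (fun v => pvBuild n (c + 1) (N - v) (res ++ [v]))

theorem stone_counter_eq_build (M : Int) :
    ∀ (n : Nat) (c N : Int) (res : List Int) (total : List (List Int)),
      (M + 1 - c).toNat = n →
      stone_counter N M c res total = total ++ pvBuild n c N res := by
  intro n
  induction n with
  | zero =>
    intro c N res total h
    rw [stone_counter]
    rw [if_pos (by omega)]
    simp [pvBuild]
    split <;> simp
  | succ n ih =>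
    intro c N res total h
    rw [stone_counter]
    rw [if_neg (by omega)]
    have hc : (M + 1 - (c + 1)).toNat = n := by omega
    by_cases hm : PySem.Int.mod c 2 = 0
    · rw [if_pos hm]
      rw [ih (c+1) (N-1) (res ++ [1]) total hc,
        ih (c+1) (N-3) (res ++ [3]) _ hc]
      simp only [pvBuild, if_pos hm, List.flatMap_cons, List.flatMap_nil]
      simp
    · rw [if_neg hm]
      rw [ih (c+1) (N-1) (res ++ [1]) total hc,
        ih (c+1) (N-2) (res ++ [2]) _ hc,
        ih (c+1) (N-3) (res ++ [3]) _ hc]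
      simp only [pvBuild, if_neg hm, List.flatMap_cons, List.flatMap_nil]
      simp

theorem finalize_eq (S : List (Int × List Int)) :
    ∀ total, S.foldl (fun t s => if s.1 = 0 then t ++ [s.2] else t) total
      = total ++ S.flatMap (fun s => if s.1 = 0 then [s.2] else []) := by
  induction S with
  | nil => simp
  | cons s S ih =>
    intro total
    simp only [List.foldl_cons, List.flatMap_cons, ih]
    split <;> simp

theorem alt_loop_eq_build (M : Int) :
    ∀ (n : Nat) (c : Int) (S : List (Int × List Int)) (total : List (List Int)),
      (M + 1 - c).toNat = n →
      (((PySem.List.pyRange c (M + 1) 1).foldl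
          (fun S i =>
            let allowed := if PySem.Int.mod i 2 = 0 then [(1 : Int), 3] else [1, 2, 3]
            S.flatMap (fun s => allowed.map (fun v => (s.1 - v, s.2 ++ [v]))))
          S).foldl (fun t s => if s.1 = 0 then t ++ [s.2] else t) total)
      = total ++ S.flatMap (fun s => pvBuild n c s.1 s.2) := by
  intro n
  induction n with
  | zero =>
    intro c S total h
    rw [PySem.List.pyRange_one_eq_nil (by omega)]
    simp only [List.foldl_nil]
    rw [finalize_eq]
    simp [pvBuild]
  | succ n ih =>
    intro c S total h
    rw [PySem.List.pyRange_one_cons (by omega)]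
    rw [List.foldl_cons]
    rw [ih (c + 1) _ total (by omega)]
    congr 1
    rw [List.flatMap_assoc]
    apply List.flatMap_congr
    intro s hs
    rw [List.flatMap_map]
    simp only [pvBuild]

-- ===== VERDICT (by name: the statement is the Claim_ definition above) =====
theorem stone_counter_spec : Claim_equal_stone_counter := by
  intro N M c res total _ _
  unfold Spec_stone_counter stone_counter_alt
  rw [alt_loop_eq_build M (M + 1 - c).toNat c [(N, res)] total rfl]
  rw [stone_counter_eq_build M (M + 1 - c).toNat c N res total rfl]
  simp
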